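-- pv_equiv track=rewrite | github.com/tianyuningmou/machine_learning | middle_noun.py | find_middle_noun
-- ===== SOURCE A (Python) =====
-- def find_middle_noun(num_list):
--     min_list = list()
--     max_list = list()
--     result = list()
--     if len(num_list) % 2 == 0:
--         for i in range(len(num_list)):
--             for j in range(len(num_list)):
--                 if num_list[i] < num_list[j]:
--                     min_list.append(num_list[j])
--                 if num_list[i] > num_list[j]:
--                     max_list.append(num_list[j])
--             if abs(len(min_list) - len(max_list)) != 1:
--                 min_list = []
--                 max_list = []
--             else:
--                 result.append(num_list[i])
--                 min_list = []
--                 max_list = []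
--     else:
--         for i in range(len(num_list)):
--             for j in range(len(num_list)):
--                 if num_list[i] < num_list[j]:
--                     min_list.append(num_list[j])
--                 if num_list[i] > num_list[j]:
--                     max_list.append(num_list[j])
--             if len(min_list) != len(max_list):
--                 min_list = []
--                 max_list = []
--             else:
--                 result.append(num_list[i])
--     return result
-- ===== SOURCE B (Python) =====
-- def find_middle_noun(num_list):
--     n = len(num_list)
--     s = sorted(num_list)
--     bal = {}
--     i = 0
--     while i < n:
--         v = s[i]
--         j = i + 1
--         while j < n and s[j] == v:
--             j += 1
--         bal[v] = (i, n - j)   # (count strictly less, count strictly greater)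
--         i = j
--     if n % 2 == 0:
--         return [x for x in num_list if abs(bal[x][1] - bal[x][0]) == 1]
--     return [x for x in num_list if bal[x][0] == bal[x][1]]
-- ===== Notes on version B (the rewrite author's own statement) =====
-- stated objective: faster
-- what changed: Replaces the quadratic per-element rescans (and A's carried min/max list state) by one sort plus a single run-scan that builds a dict value -> (strictly-less count, strictly-greater count), then one filter pass in original order.
import Mathlib
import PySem

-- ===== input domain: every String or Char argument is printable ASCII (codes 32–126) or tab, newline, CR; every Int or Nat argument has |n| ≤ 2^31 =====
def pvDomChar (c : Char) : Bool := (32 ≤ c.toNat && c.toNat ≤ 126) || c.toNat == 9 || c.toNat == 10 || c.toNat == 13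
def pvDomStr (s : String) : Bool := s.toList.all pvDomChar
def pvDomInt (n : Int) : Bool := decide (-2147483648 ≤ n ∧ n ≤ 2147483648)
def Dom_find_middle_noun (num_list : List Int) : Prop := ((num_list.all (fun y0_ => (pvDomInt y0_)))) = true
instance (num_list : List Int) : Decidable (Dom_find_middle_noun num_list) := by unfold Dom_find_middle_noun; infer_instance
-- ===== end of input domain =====

-- B replaces A's per-element rescans of the whole list by one sort plus a single run-scan
-- building a dict value -> (strictly-less count, strictly-greater count), then one filter pass.

-- ===== PORT A =====
-- inner 'for j' loop: appends num_list[j] to min_list when num_list[i] < num_list[j], to max_list when >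
def fmnInner (x : Int) (lst : List Int) (minl maxl : List Int) : List Int × List Int :=
  lst.foldl (fun st y =>
    let st1 := if x < y then (st.1 ++ [y], st.2) else st
    if x > y then (st1.1, st1.2 ++ [y]) else st1) (minl, maxl)

def find_middle_noun (num_list : List Int) : List Int :=
  if num_list.length % 2 = 0 then
    (num_list.foldl (fun (st : List Int × List Int × List Int) x =>
        let p := fmnInner x num_list st.1 st.2.1
        if ((p.1.length : Int) - (p.2.length : Int)).natAbs ≠ 1 then ([], [], st.2.2)
        else ([], [], st.2.2 ++ [x])) ([], [], [])).2.2
  else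
    (num_list.foldl (fun (st : List Int × List Int × List Int) x =>
        let p := fmnInner x num_list st.1 st.2.1
        if p.1.length ≠ p.2.length then ([], [], st.2.2)
        else (p.1, p.2, st.2.2 ++ [x])) ([], [], [])).2.2

-- ===== PORT B =====
-- the 'while i < n' loop over the sorted list: each step consumes one run of equal values
-- (the inner 'while j' advance) and records bal[v] = (i, n - j) = (seen, n - seen - run)
def fmnBuild (n : Int) : List Int → Int → PySem.Dict Int (Int × Int) → PySem.Dict Int (Int × Int)
  | [], _, bal => bal
  | x :: xs, seen, bal =>
      let r : Int := 1 + ((xs.takeWhile (fun y => y == x)).length : Int)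
      fmnBuild n (xs.dropWhile (fun y => y == x)) (seen + r) (bal.insert x (seen, n - seen - r))
termination_by l => l.length
decreasing_by
  exact Nat.lt_succ_of_le (List.length_dropWhile_le _ _)

def find_middle_noun_alt (num_list : List Int) : List Int :=
  let n : Int := num_list.length
  let s := PySem.List.sorted num_list (fun x => x) false
  let bal := fmnBuild n s 0 PySem.Dict.empty
  -- Python's bal[x] (KeyError if absent) ported as getD: every x of num_list is a key of bal
  if n % 2 = 0 then
    num_list.filter (fun x => ((bal.getD x (0, 0)).2 - (bal.getD x (0, 0)).1).natAbs == 1)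
  else
    num_list.filter (fun x => (bal.getD x (0, 0)).1 == (bal.getD x (0, 0)).2)

-- ===== PRECONDITION & SPEC =====
def Spec_find_middle_noun (num_list : List Int) (out : List Int) : Prop := out = find_middle_noun_alt num_list
instance (num_list : List Int) (out : List Int) : Decidable (Spec_find_middle_noun num_list out) := by unfold Spec_find_middle_noun; infer_instance

-- ===== CLAIM (what is proved, stated in full; the proofs are below) =====
def Claim_equal_find_middle_noun : Prop := ∀ (num_list : List Int), Dom_find_middle_noun num_list → Spec_find_middle_noun num_list (find_middle_noun num_list)

-- ===== LEMMAS AND PROOFS =====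

-- strictly-greater / strictly-less counts of x in L (as lengths of filters)
def gCnt (x : Int) (L : List Int) : Nat := (L.filter (fun y => x < y)).length
def lCnt (x : Int) (L : List Int) : Nat := (L.filter (fun y => y < x)).length

-- names for A's two step functions (definitionally the lambdas of the port)
def stepE (NL : List Int) (st : List Int × List Int × List Int) (x : Int) :
    List Int × List Int × List Int :=
  let p := fmnInner x NL st.1 st.2.1
  if ((p.1.length : Int) - (p.2.length : Int)).natAbs ≠ 1 then ([], [], st.2.2)
  else ([], [], st.2.2 ++ [x])

def stepO (NL : List Int) (st : List Int × List Int × List Int) (x : Int) :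
    List Int × List Int × List Int :=
  let p := fmnInner x NL st.1 st.2.1
  if p.1.length ≠ p.2.length then ([], [], st.2.2)
  else (p.1, p.2, st.2.2 ++ [x])

-- the membership predicates A's two branches amount to
def pEv (NL : List Int) (x : Int) : Bool := ((gCnt x NL : Int) - (lCnt x NL : Int)).natAbs == 1
def pOd (NL : List Int) (x : Int) : Bool := gCnt x NL == lCnt x NL

-- the inner j-loop collects exactly the strictly-greater / strictly-less elements, appended
theorem fmnInner_eq (x : Int) (L : List Int) : ∀ (m M : List Int),
    fmnInner x L m M = (m ++ L.filter (fun y => x < y), M ++ L.filter (fun y => y < x)) := by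
  induction L with
  | nil => intro m M; simp [fmnInner]
  | cons y L ih =>
    intro m M
    simp only [fmnInner, List.foldl_cons] at *
    by_cases h1 : x < y
    · have h2 : ¬ x > y := by omega
      simpa [h1, h2, List.filter_cons] using ih (m ++ [y]) M
    · by_cases h2 : x > y
      · have hy : y < x := h2
        simpa [h1, h2, hy, List.filter_cons] using ih m (M ++ [y])
      · have hy : ¬ y < x := by omega
        simpa [h1, h2, hy, List.filter_cons] using ih m M

theorem fmnInner_len (x : Int) (L m M : List Int) :
    (fmnInner x L m M).1.length = m.length + gCnt x L ∧
    (fmnInner x L m M).2.length = M.length + lCnt x L := by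
  rw [fmnInner_eq]; simp [gCnt, lCnt]

theorem stepE_app (NL : List Int) (res : List Int) (x : Int) :
    stepE NL ([], [], res) x = if pEv NL x then ([], [], res ++ [x]) else ([], [], res) := by
  obtain ⟨h1, h2⟩ := fmnInner_len x NL [] []
  simp only [stepE, pEv]
  simp only [List.length_nil, Nat.zero_add] at h1 h2
  rw [h1, h2]
  by_cases hc : ((gCnt x NL : Int) - (lCnt x NL : Int)).natAbs = 1
  · rw [if_neg (by omega), if_pos (by simpa using hc)]
  · rw [if_pos (by omega), if_neg (by simpa using hc)]

theorem stepO_app (NL m M res : List Int) (x : Int) (h : m.length = M.length) :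
    stepO NL (m, M, res) x =
      if pOd NL x then ((fmnInner x NL m M).1, (fmnInner x NL m M).2, res ++ [x])
      else ([], [], res) := by
  obtain ⟨h1, h2⟩ := fmnInner_len x NL m M
  simp only [stepO, pOd]
  by_cases hc : gCnt x NL = lCnt x NL
  · rw [if_neg (by omega), if_pos (by simpa using hc)]
  · rw [if_pos (by omega), if_neg (by simpa using hc)]

-- A, even branch: state is reset every iteration, result is a filter
theorem foldl_stepE (NL : List Int) : ∀ (L res : List Int),
    (L.foldl (stepE NL) ([], [], res)).2.2 = res ++ L.filter (pEv NL) := by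
  intro L
  induction L with
  | nil => intro res; simp
  | cons x L ih =>
    intro res
    rw [List.foldl_cons, stepE_app, List.filter_cons]
    by_cases hc : pEv NL x = true
    · rw [if_pos hc, if_pos hc, ih]
      simp
    · rw [if_neg (by simpa using hc), if_neg (by simpa using hc), ih]

-- A, odd branch: the carried min/max lists always have EQUAL lengths, so the carry cancels
theorem foldl_stepO (NL : List Int) : ∀ (L m M res : List Int), m.length = M.length →
    (L.foldl (stepO NL) (m, M, res)).2.2 = res ++ L.filter (pOd NL) := by
  intro L
  induction L with
  | nil => intro m M res _; simp
  | cons x L ih =>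
    intro m M res hmM
    obtain ⟨h1, h2⟩ := fmnInner_len x NL m M
    rw [List.foldl_cons, stepO_app NL m M res x hmM, List.filter_cons]
    by_cases hc : pOd NL x = true
    · rw [if_pos hc, if_pos hc]
      have heq : (fmnInner x NL m M).1.length = (fmnInner x NL m M).2.length := by
        simp only [pOd, beq_iff_eq] at hc; omega
      rw [ih (fmnInner x NL m M).1 (fmnInner x NL m M).2 (res ++ [x]) heq]
      simp
    · rw [if_neg (by simpa using hc), if_neg (by simpa using hc), ih [] [] res rfl]

-- fmnBuild never touches keys outside its list
theorem fmnBuild_get_notmem (n x : Int) : ∀ (t : List Int) (seen : Int)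
    (bal : PySem.Dict Int (Int × Int)), x ∉ t →
    (fmnBuild n t seen bal).get? x = bal.get? x := by
  intro t seen bal
  induction t, seen, bal using fmnBuild.induct n with
  | case1 seen bal => intro _; rw [fmnBuild]
  | case2 v xs seen bal r ih =>
    intro hx
    rw [fmnBuild]
    rw [ih (fun hmem => hx (List.mem_cons_of_mem v ((List.dropWhile_sublist _).mem hmem)))]
    exact PySem.Dict.get?_insert_of_ne bal _ (fun he => hx (he ▸ List.mem_cons_self))

-- all elements the head's run drops are strictly greater than the head (sorted list)
theorem drop_gt_head (v : Int) : ∀ (xs : List Int), (v :: xs).Pairwise (· ≤ ·) →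
    ∀ y ∈ xs.dropWhile (fun y => y == v), v < y := by
  intro xs
  induction xs with
  | nil => intro _ y hy; simp at hy
  | cons a as ih =>
    intro hp y hy
    by_cases ha : (a == v) = true
    · simp only [List.dropWhile_cons, ha, if_true] at hy
      exact ih (hp.sublist (List.Sublist.cons₂ v (List.sublist_cons_self a as))) y hy
    · simp only [List.dropWhile_cons, ha] at hy
      have hva : v < a := by
        have h1 : v ≤ a := List.rel_of_pairwise_cons hp List.mem_cons_self
        have h2 : a ≠ v := by simpa using ha
        omega
      rcases List.mem_cons.mp hy with h | h
      · omega
      · have h3 : a ≤ y := List.rel_of_pairwise_cons (hp.sublist (List.sublist_cons_self v _)) h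
        omega

-- the dict built over a sorted list holds each member's (less, greater) counts
theorem fmnBuild_get (n x : Int) : ∀ (t : List Int) (seen : Int)
    (bal : PySem.Dict Int (Int × Int)), t.Pairwise (· ≤ ·) → x ∈ t →
    (fmnBuild n t seen bal).get? x
      = some (seen + (lCnt x t : Int), n - seen - (t.length : Int) + (gCnt x t : Int)) := by
  intro t seen bal
  induction t, seen, bal using fmnBuild.induct n with
  | case1 seen bal => intro _ h; simp at h
  | case2 v xs seen bal r ih =>
    intro hp hx
    have htd : xs.takeWhile (fun y => y == v) ++ xs.dropWhile (fun y => y == v) = xs :=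
      List.takeWhile_append_dropWhile
    have htk : ∀ y ∈ xs.takeWhile (fun y => y == v), y = v :=
      fun y hy => by simpa using List.mem_takeWhile_imp hy
    have hdp : ∀ y ∈ xs.dropWhile (fun y => y == v), v < y := drop_gt_head v xs hp
    have hlen : (v :: xs).length = 1 + (xs.takeWhile (fun y => y == v)).length
        + (xs.dropWhile (fun y => y == v)).length := by
      have h := congrArg List.length htd
      simp only [List.length_append] at h
      simp only [List.length_cons]
      omega
    rw [fmnBuild]
    by_cases hxv : x = v
    · subst hxv
      have hxdp : x ∉ xs.dropWhile (fun y => y == x) := fun h => absurd (hdp x h) (by omega)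
      rw [fmnBuild_get_notmem n x _ _ _ hxdp, PySem.Dict.get?_insert_self]
      have hl : lCnt x (x :: xs) = 0 := by
        simp only [lCnt, List.length_eq_zero_iff, List.filter_eq_nil_iff]
        intro a ha
        rcases List.mem_cons.mp ha with h | h
        · simp [h]
        · rcases (List.mem_append.mp (htd ▸ h)) with h' | h'
          · simp [htk a h']
          · have := hdp a h'; simp; omega
      have hg : gCnt x (x :: xs) = (xs.dropWhile (fun y => y == x)).length := by
        simp only [gCnt, List.filter_cons]
        have : ¬ (x < x) := by omega
        simp only [this, decide_false]
        conv_lhs => rw [← htd, List.filter_append]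
        have h1 : (xs.takeWhile (fun y => y == x)).filter (fun y => decide (x < y)) = [] := by
          rw [List.filter_eq_nil_iff]; intro a ha; simp [htk a ha]
        have h2 : (xs.dropWhile (fun y => y == x)).filter (fun y => decide (x < y))
            = xs.dropWhile (fun y => y == x) := by
          rw [List.filter_eq_self]; intro a ha; simpa using hdp a ha
        rw [h1, h2]; simp
      rw [hl, hg]
      simp only [Option.some.injEq, Prod.mk.injEq]
      constructor
      · omega
      · rw [hlen]; push_cast; ring
    · -- x is in the tail; all run elements equal v, so x is in the dropped suffix
      have hxxs : x ∈ xs := by rcases List.mem_cons.mp hx with h | h; exact absurd h hxv; exact h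
      have hxdp : x ∈ xs.dropWhile (fun y => y == v) := by
        rcases List.mem_append.mp (htd ▸ hxxs) with h | h
        · exact absurd (htk x h) hxv
        · exact h
      have hpd : (xs.dropWhile (fun y => y == v)).Pairwise (· ≤ ·) :=
        hp.sublist (((List.dropWhile_sublist _).trans (List.sublist_cons_self v xs)))
      rw [ih hpd hxdp]
      have hvx : v < x := hdp x hxdp
      have hl : lCnt x (v :: xs) = 1 + (xs.takeWhile (fun y => y == v)).length
          + lCnt x (xs.dropWhile (fun y => y == v)) := by
        simp only [lCnt, List.filter_cons]
        simp only [show (decide (v < x)) = true by simpa using hvx, if_true]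
        conv_lhs => rw [← htd, List.filter_append]
        have h1 : (xs.takeWhile (fun y => y == v)).filter (fun y => decide (y < x))
            = xs.takeWhile (fun y => y == v) := by
          rw [List.filter_eq_self]; intro a ha; simp [htk a ha]; omega
        rw [h1]; simp; omega
      have hg : gCnt x (v :: xs) = gCnt x (xs.dropWhile (fun y => y == v)) := by
        simp only [gCnt, List.filter_cons]
        simp only [show (decide (x < v)) = false by simp; omega]
        conv_lhs => rw [← htd, List.filter_append]
        have h1 : (xs.takeWhile (fun y => y == v)).filter (fun y => decide (x < y)) = [] := by
          rw [List.filter_eq_nil_iff]; intro a ha; simp [htk a ha]; omega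
        rw [h1]; simp
      rw [hl, hg]
      simp only [Option.some.injEq, Prod.mk.injEq]
      constructor
      · push_cast; ring
      · rw [hlen]; push_cast; ring

-- B's dict lookup yields each element's (less, greater) counts over the original list
theorem fmn_alt_dict (NL : List Int) : ∀ x ∈ NL,
    (fmnBuild (NL.length : Int) (PySem.List.sorted NL (fun x => x) false) 0
        PySem.Dict.empty).getD x (0, 0)
      = ((lCnt x NL : Int), (gCnt x NL : Int)) := by
  intro x hx
  have hs : x ∈ PySem.List.sorted NL (fun x => x) false :=
    (PySem.List.mem_sorted _ _ _ _).mpr hx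
  have hpair : (PySem.List.sorted NL (fun x => x) false).Pairwise (· ≤ ·) := by
    simpa using PySem.List.sorted_pairwise NL (fun x => x)
  have hget := fmnBuild_get (NL.length : Int) x
    (PySem.List.sorted NL (fun x => x) false) 0 PySem.Dict.empty hpair hs
  have hperm := PySem.List.sorted_perm NL (fun x => x) false
  have hl : lCnt x (PySem.List.sorted NL (fun x => x) false) = lCnt x NL :=
    (hperm.filter _).length_eq
  have hg : gCnt x (PySem.List.sorted NL (fun x => x) false) = gCnt x NL :=
    (hperm.filter _).length_eq
  have hlen : (PySem.List.sorted NL (fun x => x) false).length = NL.length := hperm.length_eq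
  rw [hl, hg, hlen] at hget
  rw [PySem.Dict.getD_of_get?_eq_some _ (0, 0) hget]
  simp only [Prod.mk.injEq]
  constructor <;> omega

-- ===== VERDICT (by name: the statement is the Claim_ definition above) =====
theorem find_middle_noun_spec : Claim_equal_find_middle_noun := by
  intro NL _
  unfold Spec_find_middle_noun
  have hA : find_middle_noun NL =
      if NL.length % 2 = 0 then (NL.foldl (stepE NL) ([], [], [])).2.2
      else (NL.foldl (stepO NL) ([], [], [])).2.2 := rfl
  have hB : find_middle_noun_alt NL =
      if (NL.length : Int) % 2 = 0 then NL.filter (pEv NL) else NL.filter (pOd NL) := by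
    simp only [find_middle_noun_alt]
    by_cases hpar : (NL.length : Int) % 2 = 0
    · rw [if_pos hpar, if_pos hpar]
      refine List.filter_congr (fun x hx => ?_)
      rw [fmn_alt_dict NL x hx]
      simp [pEv]
    · rw [if_neg hpar, if_neg hpar]
      refine List.filter_congr (fun x hx => ?_)
      rw [fmn_alt_dict NL x hx]
      simp only [pOd]
      by_cases hc : gCnt x NL = lCnt x NL
      · simp [hc]
      · have h1 : ((lCnt x NL : Int) == (gCnt x NL : Int)) = false := by
          rw [beq_eq_false_iff_ne]; intro he; apply hc; omega
        have h2 : (gCnt x NL == lCnt x NL) = false := by simp [hc]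
        rw [h1, h2]
  rw [hA, hB]
  by_cases hpar : NL.length % 2 = 0
  · rw [if_pos hpar, if_pos (by omega), foldl_stepE]
    exact List.nil_append _
  · rw [if_neg hpar, if_neg (by omega), foldl_stepO NL NL [] [] [] rfl]
    exact List.nil_append _
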